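-- pv_equiv track=rewrite | github.com/dsiegler19/learning_machine_learning | NLP/preprocessing.py | bio_tagger
-- ===== SOURCE A (Python) =====
-- def bio_tagger(ne_tagged):
--     bio_tagged = []
--     prev_tag = "O"
--     for token, tag in ne_tagged:
--         if tag == "O":  # O
--             bio_tagged.append((token, tag))
--             prev_tag = tag
--             continue
--         if tag != "O" and prev_tag == "O":  # Begin NE
--             bio_tagged.append((token, "B-" + tag))
--             prev_tag = tag
--         elif prev_tag != "O" and prev_tag == tag:  # Inside NE
--             bio_tagged.append((token, "I-" + tag))
--             prev_tag = tag
--         elif prev_tag != "O" and prev_tag != tag:  # Adjacent NE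
--             bio_tagged.append((token, "B-" + tag))
--             prev_tag = tag
--     return bio_tagged
-- ===== SOURCE B (Python) =====
-- def bio_tagger(ne_tagged):
--     out = []
--     i, n = 0, len(ne_tagged)
--     while i < n:
--         tag = ne_tagged[i][1]
--         j = i
--         while j < n and ne_tagged[j][1] == tag:
--             j += 1
--         if tag == "O":
--             out.extend(ne_tagged[i:j])
--         else:
--             out.append((ne_tagged[i][0], "B-" + tag))
--             out.extend((tok, "I-" + tag) for tok, _ in ne_tagged[i + 1:j])
--         i = j
--     return out
-- ===== Notes on version B (the rewrite author's own statement) =====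
-- stated objective: alternative
-- what changed: Replaces the per-token prev_tag accumulator scan by a run-based two-pointer scan: the stream is split into maximal runs of equal tag, each run emitted at once ('O' runs verbatim, otherwise B- head and I- tail).
import Mathlib
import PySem

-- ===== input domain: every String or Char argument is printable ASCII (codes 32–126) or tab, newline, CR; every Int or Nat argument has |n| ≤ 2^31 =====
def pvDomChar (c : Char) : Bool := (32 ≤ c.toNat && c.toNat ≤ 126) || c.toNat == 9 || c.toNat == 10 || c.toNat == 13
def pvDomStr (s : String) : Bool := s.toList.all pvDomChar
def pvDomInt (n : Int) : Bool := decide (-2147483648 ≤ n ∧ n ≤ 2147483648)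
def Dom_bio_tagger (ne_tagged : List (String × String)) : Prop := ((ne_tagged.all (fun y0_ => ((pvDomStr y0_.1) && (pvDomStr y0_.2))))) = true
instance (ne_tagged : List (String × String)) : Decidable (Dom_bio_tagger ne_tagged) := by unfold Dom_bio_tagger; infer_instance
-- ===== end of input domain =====

-- B rewrites A's per-token prev_tag scan as a run-based scan (maximal runs of equal tag,
-- emitted per run); an alternative decomposition of the same O(n) task.

-- ===== PORT A =====
-- one iteration of A's for-loop: state (bio_tagged, prev_tag)
def bioStep (acc : List (String × String) × String) (p : String × String) :
    List (String × String) × String :=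
  let bio := acc.1; let prev := acc.2
  let token := p.1; let tag := p.2
  if tag = "O" then (bio ++ [(token, tag)], tag)
  else if tag ≠ "O" ∧ prev = "O" then (bio ++ [(token, "B-" ++ tag)], tag)
  else if prev ≠ "O" ∧ prev = tag then (bio ++ [(token, "I-" ++ tag)], tag)
  else if prev ≠ "O" ∧ prev ≠ tag then (bio ++ [(token, "B-" ++ tag)], tag)
  else (bio, prev)

def bio_tagger (ne_tagged : List (String × String)) : List (String × String) :=
  (ne_tagged.foldl bioStep ([], "O")).1

-- ===== PORT B =====
-- split off the maximal leading run of pairs whose tag equals `tag` (B's inner while loop)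
def runSpan (tag : String) : List (String × String) →
    List (String × String) × List (String × String)
  | [] => ([], [])
  | (t, g) :: rest =>
      if g = tag then
        let s := runSpan tag rest
        ((t, g) :: s.1, s.2)
      else ([], (t, g) :: rest)

theorem runSpan_len (tag : String) (l : List (String × String)) :
    (runSpan tag l).2.length ≤ l.length := by
  induction l with
  | nil => simp [runSpan]
  | cons p rest ih =>
      obtain ⟨t, g⟩ := p
      simp only [runSpan]
      split
      · exact le_trans ih (Nat.le_succ _)
      · simp

-- emit one run (B's per-run body)
def emitRun (tag : String) (run : List (String × String)) : List (String × String) :=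
  if tag = "O" then run
  else
    match run with
    | [] => []
    | (t, _) :: rest => (t, "B-" ++ tag) :: rest.map (fun p => (p.1, "I-" ++ tag))

def bio_tagger_alt : List (String × String) → List (String × String)
  | [] => []
  | (t, g) :: rest =>
      emitRun g ((t, g) :: (runSpan g rest).1) ++ bio_tagger_alt (runSpan g rest).2
termination_by l => l.length
decreasing_by
  simpa using Nat.lt_succ_of_le (runSpan_len g rest)

-- ===== PRECONDITION & SPEC =====
def Spec_bio_tagger (ne_tagged : List (String × String)) (out : List (String × String)) : Prop := out = bio_tagger_alt ne_tagged
instance (ne_tagged : List (String × String)) (out : List (String × String)) : Decidable (Spec_bio_tagger ne_tagged out) := by unfold Spec_bio_tagger; infer_instance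

-- ===== CLAIM (what is proved, stated in full; the proofs are below) =====
def Claim_equal_bio_tagger : Prop := ∀ (ne_tagged : List (String × String)), Dom_bio_tagger ne_tagged → Spec_bio_tagger ne_tagged (bio_tagger ne_tagged)

-- ===== LEMMAS AND PROOFS =====

-- what A's loop appends after the accumulator, as a function of prev_tag and the rest
def cont (prev : String) : List (String × String) → List (String × String)
  | [] => []
  | (t, h) :: rest =>
      if h = "O" then (t, h) :: cont "O" rest
      else if prev = "O" ∨ prev ≠ h then (t, "B-" ++ h) :: cont h rest
      else (t, "I-" ++ h) :: cont h rest

theorem foldl_bioStep (l : List (String × String)) :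
    ∀ (bio : List (String × String)) (prev : String),
      (l.foldl bioStep (bio, prev)).1 = bio ++ cont prev l := by
  induction l with
  | nil => intro bio prev; simp [cont]
  | cons p rest ih =>
      intro bio prev
      obtain ⟨t, h⟩ := p
      simp only [List.foldl_cons, bioStep, cont]
      by_cases hO : h = "O"
      · simp [hO, ih]
      · by_cases hp : prev = "O"
        · simp [hO, hp, ih]
        · by_cases he : prev = h
          · simp [hO, he, ih]
          · simp [hO, hp, he, ih]

def tagAs (g : String) (p : String × String) : String × String :=
  if g = "O" then p else (p.1, "I-" ++ g)

theorem map_tagAs_O (l : List (String × String)) : l.map (tagAs "O") = l := by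
  have h : tagAs "O" = id := by funext p; simp [tagAs]
  simp [h]

theorem cont_runSpan (l : List (String × String)) :
    ∀ g : String,
      cont g l = ((runSpan g l).1).map (tagAs g) ++ bio_tagger_alt (runSpan g l).2 := by
  induction l with
  | nil => intro g; simp [cont, runSpan, bio_tagger_alt]
  | cons p rest ih =>
      intro g
      obtain ⟨t, h⟩ := p
      by_cases hg : h = g
      · subst hg
        by_cases hO : h = "O"
        · simp [cont, runSpan, hO, tagAs, ih "O"]
        · simp [cont, runSpan, hO, tagAs, ih h]
      · -- run of g ends here: runSpan returns ([], whole list)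
        have hspan : runSpan g ((t, h) :: rest) = ([], (t, h) :: rest) := by
          simp [runSpan, hg]
        rw [hspan]
        simp only [List.map_nil, List.nil_append]
        by_cases hO : h = "O"
        · subst hO
          simp only [cont]
          rw [bio_tagger_alt, ih "O"]
          simp [emitRun, map_tagAs_O]
        · simp only [cont, if_neg hO]
          have : (g = "O" ∨ g ≠ h) := by tauto
          rw [if_pos this, bio_tagger_alt, ih h]
          simp [emitRun, hO, tagAs]

theorem alt_eq_cont (l : List (String × String)) : bio_tagger_alt l = cont "O" l := by
  cases l with
  | nil => simp [bio_tagger_alt, cont]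
  | cons p rest =>
      obtain ⟨t, h⟩ := p
      by_cases hO : h = "O"
      · subst hO
        rw [bio_tagger_alt]
        simp [cont, cont_runSpan rest "O", emitRun, map_tagAs_O]
      · rw [bio_tagger_alt]
        simp [cont, hO, cont_runSpan rest h, emitRun, tagAs]

-- ===== VERDICT (by name: the statement is the Claim_ definition above) =====
theorem bio_tagger_spec : Claim_equal_bio_tagger := by
  intro l _
  unfold Spec_bio_tagger bio_tagger
  rw [foldl_bioStep, alt_eq_cont]
  simp
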